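-- pv_equiv track=rewrite | github.com/danielb38/Comp-Bio-Final-Project | SmithAlgo.py | allClosePairs
-- ===== SOURCE A (Python) =====
-- def allClosePairs(distList, dist):
--   tupleList = []
--   for i in range(len(distList)):
--     for j in range(i+1, len(distList)):
--       if (distList[j]-distList[i] <= dist):
--         tupleList.append((i,j))
--       else:
--         j = len(distList)
--
--   return tupleList
-- ===== SOURCE B (Python) =====
-- def allClosePairs(distList, dist):
--     # Transposed traversal: scan column-wise (j-major), drop each found pair into
--     # a per-i bucket, and concatenate the buckets, which restores A's i-major order.
--     n = len(distList)
--     buckets = [[] for _ in range(n)]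
--     for j in range(n):
--         vj = distList[j]
--         for i in range(j):
--             if vj - distList[i] <= dist:
--                 buckets[i].append((i, j))
--     out = []
--     for b in buckets:
--         out += b
--     return out
-- ===== Notes on version B (the rewrite author's own statement) =====
-- stated objective: alternative
-- what changed: A scans row-wise (for each i, all j>i) appending directly; B scans column-wise (for each j, all i<j) into per-index buckets and concatenates the buckets, a transposed traversal whose equality rests on an interchange-of-loops argument.
import Mathlib
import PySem

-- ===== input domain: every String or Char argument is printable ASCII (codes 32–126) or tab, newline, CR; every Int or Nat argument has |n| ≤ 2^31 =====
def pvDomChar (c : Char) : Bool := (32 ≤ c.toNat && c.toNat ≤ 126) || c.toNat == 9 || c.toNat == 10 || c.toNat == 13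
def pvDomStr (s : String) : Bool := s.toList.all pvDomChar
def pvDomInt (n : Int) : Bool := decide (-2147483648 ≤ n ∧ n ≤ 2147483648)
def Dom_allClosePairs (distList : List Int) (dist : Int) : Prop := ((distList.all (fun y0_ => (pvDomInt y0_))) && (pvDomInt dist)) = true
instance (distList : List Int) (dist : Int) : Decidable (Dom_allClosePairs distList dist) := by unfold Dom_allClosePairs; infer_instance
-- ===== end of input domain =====

-- B replaces A's row-wise append loop by a transposed (column-wise) scan into per-index
-- buckets that are concatenated at the end: an alternative traversal, same O(n^2) cost.

-- ===== PORT A =====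
-- note: Python's 'else: j = len(distList)' merely rebinds the for-variable (a no-op), so it is omitted
def allClosePairs (distList : List Int) (dist : Int) : List (Int × Int) :=
  (PySem.List.pyRange 0 (distList.length : Int) 1).foldl (fun tupleList i =>
    (PySem.List.pyRange (i + 1) (distList.length : Int) 1).foldl (fun tupleList j =>
      if PySem.List.pyGetD distList j 0 - PySem.List.pyGetD distList i 0 ≤ dist then
        tupleList ++ [(i, j)]
      else
        tupleList) tupleList) []

-- ===== PORT B =====
def allClosePairs_alt (distList : List Int) (dist : Int) : List (Int × Int) :=
  let n : Int := (distList.length : Int)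
  let buckets0 : List (List (Int × Int)) := (PySem.List.pyRange 0 n 1).map (fun _ => [])
  let buckets := (PySem.List.pyRange 0 n 1).foldl (fun bs j =>
    let vj := PySem.List.pyGetD distList j 0
    (PySem.List.pyRange 0 j 1).foldl (fun bs i =>
      if vj - PySem.List.pyGetD distList i 0 ≤ dist then
        PySem.List.pySetD bs i (PySem.List.pyGetD bs i [] ++ [(i, j)])
      else bs) bs) buckets0
  buckets.foldl (fun out b => out ++ b) []

-- ===== PRECONDITION & SPEC =====
def Spec_allClosePairs (distList : List Int) (dist : Int) (out : List (Int × Int)) : Prop := out = allClosePairs_alt distList dist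
instance (distList : List Int) (dist : Int) (out : List (Int × Int)) : Decidable (Spec_allClosePairs distList dist out) := by unfold Spec_allClosePairs; infer_instance

-- ===== CLAIM (what is proved, stated in full; the proofs are below) =====
def Claim_equal_allClosePairs : Prop := ∀ (distList : List Int) (dist : Int), Dom_allClosePairs distList dist → Spec_allClosePairs distList dist (allClosePairs distList dist)

-- ===== LEMMAS AND PROOFS =====

-- the row of pairs (i, j) with i < j < m and distList[j] - distList[i] ≤ dist
def pvRow (L : List Int) (dist i m : Int) : List (Int × Int) :=
  ((PySem.List.pyRange (i + 1) m 1).filter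
    (fun j => decide (PySem.List.pyGetD L j 0 - PySem.List.pyGetD L i 0 ≤ dist))).map (fun j => (i, j))

-- A's inner loop appends exactly pvRow
lemma pvInnerA (L : List Int) (dist i : Int) (acc : List (Int × Int)) :
    (PySem.List.pyRange (i + 1) (L.length : Int) 1).foldl (fun t j =>
      if PySem.List.pyGetD L j 0 - PySem.List.pyGetD L i 0 ≤ dist then t ++ [(i, j)] else t) acc
    = acc ++ pvRow L dist i (L.length : Int) := by
  rw [PySem.List.foldl_congr_mem _ _
      (fun t j => if (fun j => decide (PySem.List.pyGetD L j 0 - PySem.List.pyGetD L i 0 ≤ dist)) j = true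
                  then t ++ [(i, j)] else t) _
      (by intro acc x _; simp)]
  rw [PySem.List.foldl_append_if]
  rfl

lemma pvA_eq (L : List Int) (dist : Int) :
    allClosePairs L dist
    = (PySem.List.pyRange 0 (L.length : Int) 1).flatMap (fun i => pvRow L dist i (L.length : Int)) := by
  unfold allClosePairs
  rw [PySem.List.foldl_congr_mem _ _ (fun acc i => acc ++ pvRow L dist i (L.length : Int)) _
      (by intro acc i _; exact pvInnerA L dist i acc)]
  rw [PySem.List.foldl_append_eq_flatMap]
  rfl

-- mapIdx over a map of range is a map of range
lemma pvMapIdx_map_range {α β : Type} (n : Nat) (g : Nat → α) (f : Nat → α → β) :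
    List.mapIdx f ((List.range n).map g) = (List.range n).map (fun i => f i (g i)) := by
  apply List.ext_getElem <;> simp

-- B's inner loop: the first m buckets get their pair appended when the condition holds
lemma pvInnerB (L : List Int) (dist j : Int) (m : Nat) (bs : List (List (Int × Int)))
    (hm : m ≤ bs.length) :
    (PySem.List.pyRange 0 (m : Int) 1).foldl (fun bs i =>
      if PySem.List.pyGetD L j 0 - PySem.List.pyGetD L i 0 ≤ dist then
        PySem.List.pySetD bs i (PySem.List.pyGetD bs i [] ++ [(i, j)])
      else bs) bs
    = bs.mapIdx (fun i b =>
        if i < m ∧ PySem.List.pyGetD L j 0 - PySem.List.pyGetD L (i : Int) 0 ≤ dist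
        then b ++ [((i : Int), j)] else b) := by
  induction m with
  | zero =>
    rw [show PySem.List.pyRange 0 ((0 : Nat) : Int) 1 = [] from
        PySem.List.pyRange_one_eq_nil (by norm_num)]
    simp only [List.foldl_nil]
    apply List.ext_getElem
    · simp
    · intro k h1 h2
      rw [List.getElem_mapIdx, if_neg (by omega)]
  | succ m ih =>
    have hm' : m ≤ bs.length := Nat.le_of_succ_le hm
    have hcast : ((m + 1 : Nat) : Int) = (m : Int) + 1 := by push_cast; ring
    rw [hcast, PySem.List.pyRange_one_succ_right (by positivity), List.foldl_append]
    rw [ih hm']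
    set F := bs.mapIdx (fun i b =>
        if i < m ∧ PySem.List.pyGetD L j 0 - PySem.List.pyGetD L (i : Int) 0 ≤ dist
        then b ++ [((i : Int), j)] else b) with hF
    have hlenF : F.length = bs.length := by rw [hF, List.length_mapIdx]
    have hmF : m < F.length := by omega
    have hFm : PySem.List.pyGetD F (m : Int) [] = bs[m]'(by omega) := by
      rw [PySem.List.pyGetD_ofNat F m [] hmF]
      simp only [hF, List.getElem_mapIdx]
      rw [if_neg (by omega)]
    simp only [List.foldl_cons, List.foldl_nil]
    by_cases hc : PySem.List.pyGetD L j 0 - PySem.List.pyGetD L (m : Int) 0 ≤ dist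
    · rw [if_pos hc, hFm, PySem.List.pySetD_natCast]
      apply List.ext_getElem
      · rw [List.length_set, hlenF, List.length_mapIdx]
      · intro k hk1 hk2
        simp only [List.getElem_set, hF, List.getElem_mapIdx]
        by_cases hkm : m = k
        · subst hkm
          rw [if_pos rfl, if_pos ⟨Nat.lt_succ_self m, hc⟩]
        · rw [if_neg hkm]
          by_cases hck : PySem.List.pyGetD L j 0 - PySem.List.pyGetD L (k : Int) 0 ≤ dist
          · by_cases hklt : k < m
            · rw [if_pos ⟨hklt, hck⟩, if_pos ⟨by omega, hck⟩]
            · rw [if_neg (fun h => hklt h.1), if_neg (by rintro ⟨h1, _⟩; omega)]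
          · rw [if_neg (fun h => hck h.2), if_neg (fun h => hck h.2)]
    · rw [if_neg hc]
      apply List.ext_getElem
      · rw [hlenF, List.length_mapIdx]
      · intro k hk1 hk2
        simp only [hF, List.getElem_mapIdx]
        by_cases hck : PySem.List.pyGetD L j 0 - PySem.List.pyGetD L (k : Int) 0 ≤ dist
        · by_cases hklt : k < m
          · rw [if_pos ⟨hklt, hck⟩, if_pos ⟨by omega, hck⟩]
          · have hkm : ¬ k = m := fun h => hc (h ▸ hck)
            rw [if_neg (fun h => hklt h.1), if_neg (by rintro ⟨h1, _⟩; omega)]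
        · rw [if_neg (fun h => hck h.2), if_neg (fun h => hck h.2)]

-- growing the bound by one extends exactly the rows with i < m and the condition at j = m
lemma pvRow_succ (L : List Int) (dist : Int) (i m : Nat) :
    pvRow L dist (i : Int) ((m : Int) + 1)
    = if i < m ∧ PySem.List.pyGetD L (m : Int) 0 - PySem.List.pyGetD L (i : Int) 0 ≤ dist
      then pvRow L dist (i : Int) (m : Int) ++ [((i : Int), (m : Int))]
      else pvRow L dist (i : Int) (m : Int) := by
  by_cases him : i < m
  · have h1 : (i : Int) + 1 ≤ (m : Int) := by exact_mod_cast him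
    unfold pvRow
    rw [PySem.List.pyRange_one_succ_right h1, List.filter_append, List.map_append,
        List.filter_singleton]
    by_cases hc : PySem.List.pyGetD L (m : Int) 0 - PySem.List.pyGetD L (i : Int) 0 ≤ dist
    · rw [if_pos ⟨him, hc⟩, decide_eq_true hc]
      rfl
    · rw [if_neg (fun h => hc h.2), decide_eq_false hc]
      simp only [Bool.cond_false, List.map_nil, List.append_nil]
  · have h1 : (m : Int) ≤ (i : Int) := by exact_mod_cast Nat.le_of_not_lt him
    rw [if_neg (fun h => him h.1)]
    unfold pvRow
    rw [PySem.List.pyRange_one_eq_nil (by omega), PySem.List.pyRange_one_eq_nil (by omega)]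

-- B's outer loop invariant
lemma pvOuterB (L : List Int) (dist : Int) (m : Nat) (hm : m ≤ L.length) :
    (PySem.List.pyRange 0 (m : Int) 1).foldl (fun bs j =>
      (PySem.List.pyRange 0 j 1).foldl (fun bs i =>
        if PySem.List.pyGetD L j 0 - PySem.List.pyGetD L i 0 ≤ dist then
          PySem.List.pySetD bs i (PySem.List.pyGetD bs i [] ++ [(i, j)])
        else bs) bs)
      ((PySem.List.pyRange 0 (L.length : Int) 1).map (fun _ => []))
    = (List.range L.length).map (fun i : Nat => pvRow L dist (i : Int) (m : Int)) := by
  induction m with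
  | zero =>
    rw [show PySem.List.pyRange 0 ((0 : Nat) : Int) 1 = [] from
        PySem.List.pyRange_one_eq_nil (by norm_num)]
    simp only [List.foldl_nil]
    rw [PySem.List.pyRange_zero_nat, List.map_map]
    apply List.map_congr_left
    intro i _
    show ([] : List (Int × Int)) = pvRow L dist (i : Int) ((0 : Nat) : Int)
    unfold pvRow
    rw [PySem.List.pyRange_one_eq_nil (by positivity)]
    rfl
  | succ m ih =>
    have hm' : m ≤ L.length := Nat.le_of_succ_le hm
    have hcast : ((m + 1 : Nat) : Int) = (m : Int) + 1 := by push_cast; ring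
    rw [hcast, PySem.List.pyRange_one_succ_right (by positivity), List.foldl_append]
    rw [ih hm']
    simp only [List.foldl_cons, List.foldl_nil]
    rw [pvInnerB L dist (m : Int) m _ (by rw [List.length_map, List.length_range]; omega)]
    rw [pvMapIdx_map_range]
    apply List.map_congr_left
    intro i _
    rw [pvRow_succ]

lemma pvB_eq (L : List Int) (dist : Int) :
    allClosePairs_alt L dist
    = (List.range L.length).flatMap (fun i : Nat => pvRow L dist (i : Int) (L.length : Int)) := by
  unfold allClosePairs_alt
  dsimp only
  rw [pvOuterB L dist L.length (le_refl _)]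
  rw [PySem.List.foldl_append_eq_flatMap]
  rw [List.nil_append, List.flatMap_map]

-- ===== VERDICT (by name: the statement is the Claim_ definition above) =====
theorem allClosePairs_spec : Claim_equal_allClosePairs := by
  intro L dist _
  unfold Spec_allClosePairs
  rw [pvA_eq, pvB_eq]
  rw [PySem.List.pyRange_zero_nat, List.flatMap_map]
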